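-- pv_equiv track=rewrite | github.com/Sapfik/Practise-Python | kata6/street_fighter2.py | street_fighter_selection
-- ===== SOURCE A (Python) =====
-- MOVES = {"up": (-1, 0), "down": (1, 0), "right": (0, 1), "left": (0, -1)}
--
-- def street_fighter_selection(fighters, initial_position, moves):
--     y, x = initial_position
--     hovered_fighters = []
--     for move in moves:
--         dy, dx = MOVES[move]
--         y += dy
--         if not 0 <= y < len(fighters):
--             y -= dy
--         x = (x + dx) % len(fighters[y])
--         hovered_fighters.append(fighters[y][x])
--     return hovered_fighters
-- ===== SOURCE B (Python) =====
-- MOVES = {"up": (-1, 0), "down": (1, 0), "right": (0, 1), "left": (0, -1)}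
--
-- def street_fighter_selection(fighters, initial_position, moves):
--     h = len(fighters)
--     # pass 1: vertical track — the row index after each move (independent of x)
--     ys = []
--     y = initial_position[0]
--     for m in moves:
--         dy = MOVES[m][0]
--         if 0 <= y + dy < h:
--             y += dy
--         ys.append(y)
--     # pass 2: horizontal track — column wrapped by the row chosen in pass 1
--     xs = []
--     x = initial_position[1]
--     for m, y in zip(moves, ys):
--         x = (x + MOVES[m][1]) % len(fighters[y])
--         xs.append(x)
--     # pass 3: names
--     return [fighters[y][x] for y, x in zip(ys, xs)]
-- ===== Notes on version B (the rewrite author's own statement) =====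
-- stated objective: alternative
-- what changed: B replaces A's single fused loop over one (y,x,output) state by three staged passes: a vertical pass computing the row index after each move, a horizontal pass computing the wrapped column per move from that row track, and a final map from (row,col) pairs to names; this works because the clamped row never depends on the column.
-- outside the precondition, e.g. on street_fighter_selection([['a'], ['b']], (2, 0), ['up']): A returns ['b'], B returns ['b']; on street_fighter_selection([['a'], []], (0, 0), ['left']): A returns ['a'], B returns ['a']
import Mathlib
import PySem

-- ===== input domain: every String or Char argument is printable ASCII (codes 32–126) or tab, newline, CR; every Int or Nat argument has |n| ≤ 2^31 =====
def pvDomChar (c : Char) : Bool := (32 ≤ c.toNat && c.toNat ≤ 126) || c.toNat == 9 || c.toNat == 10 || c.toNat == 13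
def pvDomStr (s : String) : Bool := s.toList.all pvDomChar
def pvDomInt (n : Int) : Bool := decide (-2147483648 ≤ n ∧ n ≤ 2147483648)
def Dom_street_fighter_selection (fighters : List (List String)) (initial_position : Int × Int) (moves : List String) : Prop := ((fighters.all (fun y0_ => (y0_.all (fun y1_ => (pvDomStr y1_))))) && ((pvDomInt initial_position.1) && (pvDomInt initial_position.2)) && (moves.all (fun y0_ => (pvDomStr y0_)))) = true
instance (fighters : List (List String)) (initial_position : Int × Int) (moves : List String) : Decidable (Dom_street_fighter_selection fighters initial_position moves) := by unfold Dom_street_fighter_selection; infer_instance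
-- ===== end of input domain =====

-- B: three staged passes (vertical row track, then horizontal wrapped-column track, then a name map)
-- instead of A's single fused loop over one combined state; valid since the clamped row ignores the column.

-- ===== PORT A =====
def pvMOVES : PySem.Dict String (Int × Int) :=
  PySem.Dict.insert (PySem.Dict.insert (PySem.Dict.insert (PySem.Dict.insert PySem.Dict.empty "up" (-1, 0)) "down" (1, 0)) "right" (0, 1)) "left" (0, -1)

def stepA (fighters : List (List String)) (st : Int × Int × List String) (move : String) : Int × Int × List String :=
  let y := st.1
  let x := st.2.1
  let acc := st.2.2
  let d := PySem.Dict.getD pvMOVES move (0, 0)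
  let y1 := y + d.1
  -- 'if not 0 <= y < len(fighters): y -= dy'
  let y2 := if ¬ (0 ≤ y1 ∧ y1 < (fighters.length : Int)) then y1 - d.1 else y1
  let row := PySem.List.pyGetD fighters y2 []
  let x' := PySem.Int.mod (x + d.2) (row.length : Int)
  (y2, x', acc ++ [PySem.List.pyGetD row x' ""])

def street_fighter_selection (fighters : List (List String)) (initial_position : Int × Int) (moves : List String) : List String :=
  (moves.foldl (stepA fighters) (initial_position.1, initial_position.2, [])).2.2

-- ===== PORT B =====
def pvDELTAS : PySem.Dict String (Int × Int) :=
  PySem.Dict.insert (PySem.Dict.insert (PySem.Dict.insert (PySem.Dict.insert PySem.Dict.empty "up" (-1, 0)) "down" (1, 0)) "right" (0, 1)) "left" (0, -1)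

-- pass 1: row index after each move
def sfYs (fighters : List (List String)) (y : Int) : List String → List Int
  | [] => []
  | m :: ms =>
      let dy := (PySem.Dict.getD pvDELTAS m (0, 0)).1
      let y' := if 0 ≤ y + dy ∧ y + dy < (fighters.length : Int) then y + dy else y
      y' :: sfYs fighters y' ms

-- pass 2: wrapped column per move, driven by the row track
def sfXs (fighters : List (List String)) (x : Int) : List (String × Int) → List Int
  | [] => []
  | (m, y) :: rest =>
      let x' := PySem.Int.mod (x + (PySem.Dict.getD pvDELTAS m (0, 0)).2)
                  (((PySem.List.pyGetD fighters y []).length : Int))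
      x' :: sfXs fighters x' rest

def street_fighter_selection_alt (fighters : List (List String)) (initial_position : Int × Int) (moves : List String) : List String :=
  let ys := sfYs fighters initial_position.1 moves
  let xs := sfXs fighters initial_position.2 (moves.zip ys)
  (ys.zip xs).map (fun q => PySem.List.pyGetD (PySem.List.pyGetD fighters q.1 []) q.2 "")

-- ===== PRECONDITION & SPEC =====
-- Pre_ excludes exactly the inputs where A raises (KeyError on an unknown move, IndexError/ZeroDivisionError
-- on an empty grid or empty row, IndexError on an initial row index outside Python's index range); it is
-- slightly narrower than necessary in requiring ALL rows nonempty and the INITIAL y in range even when an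
-- unvisited empty row or a rescuing first move would still let A return — B returns the same values there.
def Pre_street_fighter_selection (fighters : List (List String)) (initial_position : Int × Int) (moves : List String) : Prop :=
  moves = [] ∨
  (fighters ≠ [] ∧ (∀ row ∈ fighters, row ≠ []) ∧
  (-(fighters.length : Int) ≤ initial_position.1 ∧ initial_position.1 < (fighters.length : Int)) ∧
  (∀ m ∈ moves, m = "up" ∨ m = "down" ∨ m = "right" ∨ m = "left"))
instance (fighters : List (List String)) (initial_position : Int × Int) (moves : List String) : Decidable (Pre_street_fighter_selection fighters initial_position moves) := by unfold Pre_street_fighter_selection; infer_instance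

def pvWitness_street_fighter_selection : List (List String) × (Int × Int) × List String :=
  ([["Ryu", "Ken"], ["Chun Li"]], (0, 0), ["right", "down", "left"])

def Spec_street_fighter_selection (fighters : List (List String)) (initial_position : Int × Int) (moves : List String) (out : List String) : Prop := out = street_fighter_selection_alt fighters initial_position moves
instance (fighters : List (List String)) (initial_position : Int × Int) (moves : List String) (out : List String) : Decidable (Spec_street_fighter_selection fighters initial_position moves out) := by unfold Spec_street_fighter_selection; infer_instance

-- ===== CLAIM =====
def Claim_equal_street_fighter_selection : Prop := ∀ (fighters : List (List String)) (initial_position : Int × Int) (moves : List String), Dom_street_fighter_selection fighters initial_position moves → Pre_street_fighter_selection fighters initial_position moves → Spec_street_fighter_selection fighters initial_position moves (street_fighter_selection fighters initial_position moves)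

-- ===== LEMMAS AND PROOFS =====

def sfName (fighters : List (List String)) (q : Int × Int) : String :=
  PySem.List.pyGetD (PySem.List.pyGetD fighters q.1 []) q.2 ""

-- A's fold from (y, x, acc) appends to acc the names along B's staged position tracks from (y, x).
theorem sf_fold_eq (fighters : List (List String)) :
    ∀ (moves : List String) (y x : Int) (acc : List String),
      (moves.foldl (stepA fighters) (y, x, acc)).2.2
        = acc ++ (((sfYs fighters y moves).zip
              (sfXs fighters x (moves.zip (sfYs fighters y moves)))).map (sfName fighters))
  | [], y, x, acc => by simp [sfYs, sfXs]
  | m :: ms, y, x, acc => by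
      have hy : ∀ (a b L : Int), (if ¬ (0 ≤ a + b ∧ a + b < L) then a + b - b else a + b)
          = (if 0 ≤ a + b ∧ a + b < L then a + b else a) := by
        intro a b L; split_ifs <;> omega
      have hd : pvDELTAS = pvMOVES := rfl
      simp only [hd, List.foldl_cons, sfYs, sfXs, List.zip_cons_cons, List.map_cons, stepA, hy]
      rw [sf_fold_eq fighters ms]
      simp [sfName, List.append_assoc]

-- ===== VERDICT =====
theorem street_fighter_selection_spec : Claim_equal_street_fighter_selection := by
  intro fighters initial_position moves _ _
  unfold Spec_street_fighter_selection street_fighter_selection street_fighter_selection_alt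
  simpa using sf_fold_eq fighters moves initial_position.1 initial_position.2 []
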